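-- pv_equiv track=rewrite | github.com/tupkalenkodi/DONE | Final_27_August_2021/sequences_DONE.py | make_repr
-- ===== SOURCE A (Python) =====
-- def make_repr(seq_l):
--     repr_seq = []
--     l_comb = []
--     for i in seq_l:
--         l_comb = []
--         for j in range(len(i) - 1, -1, -1):
--             for k in range(len(i) - 1):
--                 i = i[j:] + i[:j]
--                 l_comb.append(i)
--         l_comb.sort()
--         repr_seq.append(l_comb[0])
--
--     res_repr_seq = list(set(repr_seq))
--     return res_repr_seq
-- ===== SOURCE B (Python) =====
-- def make_repr(seq_l):
--     return list({min(s[i:] + s[:i] for i in range(len(s))) for s in seq_l})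
-- ===== Notes on version B (the rewrite author's own statement) =====
-- stated objective: simpler
-- what changed: B computes each sequence's canonical form directly as the minimum over its n rotations in a one-line set comprehension, instead of materialising n*(n-1) accumulated rotation strings per sequence, sorting them and taking element [0].
-- intended difference: On lists containing a length-2 string s with s[0] < s[1], A returns the swapped string s[1]+s[0] for that element (its rotation walk never revisits offset 0 when n=2) while B returns the true minimal rotation s itself, which is the intended canonical form. — e.g. on make_repr(["ab"]): A returns ["ba"], B returns ["ab"]
import Mathlib
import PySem

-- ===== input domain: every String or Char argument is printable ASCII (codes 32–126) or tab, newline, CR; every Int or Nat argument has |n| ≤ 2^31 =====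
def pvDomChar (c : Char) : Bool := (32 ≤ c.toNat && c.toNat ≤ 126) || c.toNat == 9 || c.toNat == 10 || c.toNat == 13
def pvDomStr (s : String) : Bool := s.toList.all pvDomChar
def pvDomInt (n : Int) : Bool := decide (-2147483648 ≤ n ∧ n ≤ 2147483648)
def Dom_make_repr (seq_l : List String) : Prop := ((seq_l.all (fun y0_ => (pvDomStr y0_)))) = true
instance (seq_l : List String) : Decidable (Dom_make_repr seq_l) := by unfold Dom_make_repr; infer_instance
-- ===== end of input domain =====

-- B computes each sequence's canonical form directly as the minimum over its rotations instead of
-- materialising and sorting n*(n-1) accumulated rotation strings (objective: simpler); on length-2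
-- strings with s[0] < s[1] A's value differs from B's intended minimal rotation (see D_ below).

-- ===== PORT A =====
-- i[j:] + i[:j] (string slicing on the code-point list; exact via PySem.List.slice)
def pvRotA (i : List Char) (j : Int) : List Char :=
  PySem.List.slice i (some j) none ++ PySem.List.slice i none (some j)

-- body of A's outer-loop pass over j: for k in range(len(i)-1): i = i[j:]+i[:j]; l_comb.append(i)
def pvFA (st : List Char × List String) (j : Int) : List Char × List String :=
  (PySem.List.pyRange 0 ((st.1.length : Int) - 1) 1).foldl
    (fun (st : List Char × List String) _k =>
      let i := pvRotA st.1 j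
      (i, st.2 ++ [String.ofList i])) st

-- per-string body: the two loops, then l_comb.sort(); l_comb[0] (IndexError on empty: Pre_)
def pvElemA (i0 : String) : String :=
  let st := (PySem.List.pyRange ((i0.toList.length : Int) - 1) (-1) (-1)).foldl pvFA (i0.toList, [])
  (PySem.List.pyGet? (PySem.List.sorted st.2 (fun x => x) false) 0).getD ""

def make_repr (seq_l : List String) : List String :=
  -- res_repr_seq = list(set(repr_seq)) where repr_seq collects l_comb[0] per sequence
  PySem.Set.ofList (seq_l.foldl (fun repr_seq i0 => repr_seq ++ [pvElemA i0]) [])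

-- ===== PORT B =====
-- min(s[i:] + s[:i] for i in range(len(s))) (ValueError on an empty generator: Pre_)
def pvCanon (s : String) : String :=
  (PySem.List.min?
    ((PySem.List.pyRange 0 (s.toList.length : Int) 1).map
      (fun i => String.ofList (PySem.List.slice s.toList (some i) none ++
                               PySem.List.slice s.toList none (some i))))
    (fun x => x)).getD ""

def make_repr_alt (seq_l : List String) : List String :=
  -- list({min(...) for s in seq_l})
  PySem.Set.ofList (seq_l.map pvCanon)

-- ===== PRECONDITION & SPEC =====
-- A raises IndexError (l_comb[0] on an empty list) for every string of length 0 or 1; Pre_ excludes those.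
def Pre_make_repr (seq_l : List String) : Prop := ∀ s ∈ seq_l, 2 ≤ s.toList.length
instance (seq_l : List String) : Decidable (Pre_make_repr seq_l) := by unfold Pre_make_repr; infer_instance
def pvWitness_make_repr : List String := ["ab", "cab", "abcab"]

-- On lists containing a length-2 string s with s[0] < s[1], A returns the swapped string s[1]+s[0]
-- for that element (its rotation walk never revisits offset 0 when n = 2) while B returns the true
-- minimal rotation s itself, which is the intended canonical form.
def D_make_repr (seq_l : List String) : Prop :=
  (seq_l.any (fun s => match s.toList with
    | [a, b] => decide (a < b)
    | _ => false)) = true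
instance (seq_l : List String) : Decidable (D_make_repr seq_l) := by unfold D_make_repr; infer_instance

def Spec_make_repr (seq_l : List String) (out : List String) : Prop :=
  ¬ D_make_repr seq_l → out = make_repr_alt seq_l
instance (seq_l : List String) (out : List String) : Decidable (Spec_make_repr seq_l out) := by unfold Spec_make_repr; infer_instance

def pvDiffWitness_make_repr : List String := ["ab"]
def pvDiffWitnessOut_make_repr : (List String) × (List String) := (["ba"], ["ab"])

-- ===== CLAIM (what is proved, stated in full; the proofs are below) =====
def Claim_unchanged_make_repr : Prop := ∀ (seq_l : List String), Dom_make_repr seq_l → Pre_make_repr seq_l → Spec_make_repr seq_l (make_repr seq_l)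
def Claim_changed_make_repr : Prop := Dom_make_repr (pvDiffWitness_make_repr) ∧ Pre_make_repr (pvDiffWitness_make_repr) ∧ D_make_repr (pvDiffWitness_make_repr) ∧ make_repr (pvDiffWitness_make_repr) = pvDiffWitnessOut_make_repr.1 ∧ make_repr_alt (pvDiffWitness_make_repr) = pvDiffWitnessOut_make_repr.2 ∧ pvDiffWitnessOut_make_repr.1 ≠ pvDiffWitnessOut_make_repr.2
def Claim_exact_make_repr : Prop := ∀ (seq_l : List String), Dom_make_repr seq_l → Pre_make_repr seq_l → D_make_repr seq_l → make_repr seq_l ≠ make_repr_alt seq_l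

-- ===== LEMMAS AND PROOFS =====

-- the rotation string at integer offset t (ghost value used to characterise both ports)
def gRot (cs : List Char) (t : Int) : String := String.ofList (cs.rotate t.toNat)

-- one step of the ghost offset walk: o = (o + j) % n; offs.add(o)
def gStep (n j : Int) (p : Int × PySem.Set Int) : Int × PySem.Set Int :=
  (PySem.Int.mod (p.1 + j) n, PySem.Set.add p.2 (PySem.Int.mod (p.1 + j) n))

-- one ghost pass = n-1 ghost steps; gOut = the whole ghost walk
def gPass (n j : Int) (p : Int × PySem.Set Int) : Int × PySem.Set Int :=
  (PySem.List.pyRange 0 (n - 1) 1).foldl (fun q _k => gStep n j q) p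
def gOut (n : Int) : Int × PySem.Set Int :=
  (PySem.List.pyRange (n - 1) (-1) (-1)).foldl (fun p j => gPass n j p) (0, PySem.Set.empty)

theorem pvRotA_eq_rot (i : List Char) {j : Int} (h0 : 0 ≤ j) (h1 : j ≤ (i.length : Int)) :
    pvRotA i j = i.rotate j.toNat := by
  unfold pvRotA
  rw [PySem.List.slice_from i h0, PySem.List.slice_to i h0,
    ← List.rotate_eq_drop_append_take (by omega)]

theorem foldl_ignore {α β : Type} (f : α → α) (K : List β) (a : α) :
    K.foldl (fun p _ => f p) a = f^[K.length] a := by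
  induction K generalizing a with
  | nil => rfl
  | cons k K ih => simp [List.foldl_cons, ih, Function.iterate_succ_apply]

theorem emod_shift (n x j : Int) : (x % n + j) % n = (x + j) % n := by
  conv_rhs => rw [Int.add_emod]
  conv_lhs => rw [Int.add_emod, Int.emod_emod_of_dvd _ dvd_rfl]

theorem gIter_fst (n j : Int) (hn : 0 < n) (m : Nat) (o : Int) (offs : PySem.Set Int) :
    ((gStep n j)^[m + 1] (o, offs)).1 = (o + j * (m + 1)) % n := by
  induction m with
  | zero =>
    show (PySem.Int.mod (o + j) n) = _
    rw [PySem.Int.mod_eq_emod_of_pos hn]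
    congr 1
    push_cast
    ring
  | succ m ih =>
    rw [Function.iterate_succ_apply']
    show PySem.Int.mod (((gStep n j)^[m + 1] (o, offs)).1 + j) n = _
    rw [ih, PySem.Int.mod_eq_emod_of_pos hn, emod_shift]
    congr 1
    push_cast
    ring

theorem gIter_mem (n j : Int) (hn : 0 < n) (m : Nat) (o : Int) (offs : PySem.Set Int) (t : Int) :
    t ∈ ((gStep n j)^[m] (o, offs)).2 ↔
      t ∈ offs ∨ ∃ k : Nat, 1 ≤ k ∧ k ≤ m ∧ t = (o + j * k) % n := by
  induction m with
  | zero =>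
    simp only [Function.iterate_zero_apply]
    constructor
    · exact fun h => Or.inl h
    · rintro (h | ⟨k, hk1, hk2, _⟩)
      · exact h
      · omega
  | succ m ih =>
    rw [Function.iterate_succ_apply']
    show t ∈ PySem.Set.add _ (PySem.Int.mod (((gStep n j)^[m] (o, offs)).1 + j) n) ↔ _
    rw [PySem.Set.mem_add, ih]
    have hfst : PySem.Int.mod (((gStep n j)^[m] (o, offs)).1 + j) n = (o + j * (m + 1)) % n := by
      cases m with
      | zero =>
        show PySem.Int.mod (o + j) n = _
        rw [PySem.Int.mod_eq_emod_of_pos hn]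
        congr 1
        push_cast
        ring
      | succ m' =>
        rw [gIter_fst n j hn m' o offs, PySem.Int.mod_eq_emod_of_pos hn, emod_shift]
        congr 1
        push_cast
        ring
    rw [hfst]
    constructor
    · rintro ((h | ⟨k, hk1, hk2, rfl⟩) | rfl)
      · exact Or.inl h
      · exact Or.inr ⟨k, hk1, by omega, rfl⟩
      · exact Or.inr ⟨m + 1, by omega, by omega, by norm_cast⟩
    · rintro (h | ⟨k, hk1, hk2, rfl⟩)
      · exact Or.inl (Or.inl h)
      · by_cases hkm : k ≤ m
        · exact Or.inl (Or.inr ⟨k, hk1, hkm, rfl⟩)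
        · have : k = m + 1 := by omega
          subst this
          right
          norm_cast
theorem gPass_eq (n j : Int) (p : Int × PySem.Set Int) :
    gPass n j p = (gStep n j)^[(n - 1).toNat] p := by
  unfold gPass
  rw [foldl_ignore, PySem.List.length_pyRange_one]
  simp

theorem gMono (n : Int) (hn : 0 < n) (J : List Int) (p : Int × PySem.Set Int) (t : Int)
    (h : t ∈ p.2) : t ∈ (J.foldl (fun p j => gPass n j p) p).2 := by
  induction J generalizing p with
  | nil => exact h
  | cons j J ih =>
    simp only [List.foldl_cons]
    refine ih _ ?_
    rw [gPass_eq]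
    exact (gIter_mem n j hn _ p.1 p.2 t).2 (Or.inl h)

-- sorted l_comb head = min over any list with the same members
theorem pvMin_eq (lc l2 : List String) (hmem : ∀ y, y ∈ lc ↔ y ∈ l2) :
    (PySem.List.pyGet? (PySem.List.sorted lc (fun x => x) false) 0).getD "" =
    (PySem.List.min? l2 (fun x => x)).getD "" := by
  cases hmin : PySem.List.min? l2 (fun x => x) with
  | none =>
    have hl2 : l2 = [] := (PySem.List.min?_eq_none_iff _ _).1 hmin
    have hlc : lc = [] := by
      apply List.eq_nil_iff_forall_not_mem.2
      intro y hy
      have := (hmem y).1 hy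
      rw [hl2] at this
      exact (List.not_mem_nil) this
    have hs : PySem.List.sorted lc (fun x : String => x) false = [] := by
      rw [hlc]
      exact (PySem.List.sorted_perm ([] : List String) (fun x => x) false).eq_nil
    rw [hs]
    simp [PySem.List.pyGet?]
  | some m =>
    have hm_mem : m ∈ l2 := PySem.List.min?_mem hmin
    have hm_min : ∀ y ∈ l2, m ≤ y := fun y hy => PySem.List.min?_isMin hmin y hy
    have hmlc : m ∈ lc := (hmem m).2 hm_mem
    cases hsorted : PySem.List.sorted lc (fun x : String => x) false with
    | nil =>
      have : lc = [] := by
        have := PySem.List.sorted_perm lc (fun x : String => x) false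
        rw [hsorted] at this
        exact this.symm.eq_nil
      rw [this] at hmlc
      exact absurd hmlc (List.not_mem_nil)
    | cons y0 rest =>
      have hy0 : y0 ∈ lc := by
        rw [← PySem.List.mem_sorted lc (fun x : String => x) false, hsorted]
        exact List.mem_cons_self
      have hp := PySem.List.sorted_pairwise lc (fun x : String => x)
      rw [hsorted] at hp
      have hall : ∀ z ∈ lc, y0 ≤ z := by
        intro z hz
        have : z ∈ y0 :: rest := by
          rw [← hsorted]
          exact (PySem.List.mem_sorted lc (fun x : String => x) false z).2 hz
        rcases List.mem_cons.1 this with rfl | hz'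
        · exact le_refl _
        · exact (List.pairwise_cons.1 hp).1 z hz'
      have hget : PySem.List.pyGet? (y0 :: rest) 0 = some y0 := by
        simp [PySem.List.pyGet?, PySem.List.pyIdx?]
      rw [hget]
      simp only [Option.getD_some]
      exact le_antisymm (hall m hmlc) (hm_min y0 ((hmem y0).1 hy0))

-- lock-step inner loop: A's n-1 string rotations tracked against the ghost steps
theorem pvInner (cs : List Char) {j : Int} (hj0 : 0 ≤ j) (hj1 : j ≤ (cs.length : Int))
    (K : List Int) (i : List Char) (lc : List String) (p : Int × PySem.Set Int)
    (hil : i.length = cs.length) (ho0 : 0 ≤ p.1) (ho1 : p.1 < (cs.length : Int))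
    (hio : i = cs.rotate p.1.toNat)
    (hoffs : ∀ t ∈ p.2, 0 ≤ t ∧ t < (cs.length : Int))
    (hmem : ∀ y, y ∈ lc ↔ ∃ t ∈ p.2, y = gRot cs t) :
    (K.foldl (fun (st : List Char × List String) _k =>
        let i := pvRotA st.1 j
        (i, st.2 ++ [String.ofList i])) (i, lc)).1.length = cs.length ∧
    0 ≤ (K.foldl (fun q _k => gStep (cs.length : Int) j q) p).1 ∧
    (K.foldl (fun q _k => gStep (cs.length : Int) j q) p).1 < (cs.length : Int) ∧
    (K.foldl (fun (st : List Char × List String) _k =>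
        let i := pvRotA st.1 j
        (i, st.2 ++ [String.ofList i])) (i, lc)).1 =
      cs.rotate (K.foldl (fun q _k => gStep (cs.length : Int) j q) p).1.toNat ∧
    (∀ t ∈ (K.foldl (fun q _k => gStep (cs.length : Int) j q) p).2,
      0 ≤ t ∧ t < (cs.length : Int)) ∧
    (∀ y, y ∈ (K.foldl (fun (st : List Char × List String) _k =>
        let i := pvRotA st.1 j
        (i, st.2 ++ [String.ofList i])) (i, lc)).2 ↔
      ∃ t ∈ (K.foldl (fun q _k => gStep (cs.length : Int) j q) p).2, y = gRot cs t) := by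
  induction K generalizing i lc p with
  | nil =>
    simp only [List.foldl_nil]
    exact ⟨hil, ho0, ho1, hio, hoffs, hmem⟩
  | cons k K ih =>
    simp only [List.foldl_cons]
    have hN : 0 < (cs.length : Int) := lt_of_le_of_lt ho0 ho1
    have ho'0 : 0 ≤ PySem.Int.mod (p.1 + j) (cs.length : Int) := PySem.Int.mod_nonneg _ hN
    have ho'1 : PySem.Int.mod (p.1 + j) (cs.length : Int) < (cs.length : Int) :=
      PySem.Int.mod_lt _ hN
    have hrot : pvRotA i j = cs.rotate (PySem.Int.mod (p.1 + j) (cs.length : Int)).toNat := by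
      rw [pvRotA_eq_rot i hj0 (by rw [hil]; exact hj1), hio, List.rotate_rotate]
      have ht : (PySem.Int.mod (p.1 + j) (cs.length : Int)).toNat
          = (p.1.toNat + j.toNat) % cs.length := by
        rw [PySem.Int.mod_eq_emod_of_pos (a := p.1 + j) hN]
        have h2 : p.1 + j = ((p.1.toNat + j.toNat : Nat) : Int) := by omega
        rw [h2, ← Int.natCast_emod, Int.toNat_natCast]
      rw [ht, List.rotate_mod]
    have hlen' : (pvRotA i j).length = cs.length := by rw [hrot, List.length_rotate]
    have hmem' : ∀ y, y ∈ lc ++ [String.ofList (pvRotA i j)] ↔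
        ∃ t ∈ PySem.Set.add p.2 (PySem.Int.mod (p.1 + j) (cs.length : Int)), y = gRot cs t := by
      intro y
      rw [List.mem_append, List.mem_singleton, hmem y]
      constructor
      · rintro (⟨t, ht, rfl⟩ | rfl)
        · exact ⟨t, (PySem.Set.mem_add _ _ _).2 (Or.inl ht), rfl⟩
        · exact ⟨_, (PySem.Set.mem_add _ _ _).2 (Or.inr rfl), by rw [gRot, hrot]⟩
      · rintro ⟨t, ht, rfl⟩
        rcases (PySem.Set.mem_add _ _ _).1 ht with h | rfl
        · exact Or.inl ⟨t, h, rfl⟩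
        · exact Or.inr (by rw [gRot, hrot])
    exact ih (pvRotA i j) (lc ++ [String.ofList (pvRotA i j)]) _ hlen' ho'0 ho'1 hrot
      (fun t ht => by
        rcases (PySem.Set.mem_add _ _ _).1 ht with h | rfl
        · exact hoffs t h
        · exact ⟨ho'0, ho'1⟩) hmem'

-- invariant carried over the outer loop (any pass list with in-range increments)
theorem pvOuter (cs : List Char) (_hn : 0 < cs.length) (J : List Int)
    (hJ : ∀ j ∈ J, 0 ≤ j ∧ j ≤ (cs.length : Int) - 1)
    (stA : List Char × List String) (p : Int × PySem.Set Int)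
    (h1 : stA.1.length = cs.length) (h2 : 0 ≤ p.1) (h3 : p.1 < (cs.length : Int))
    (h4 : stA.1 = cs.rotate p.1.toNat)
    (h5 : ∀ t ∈ p.2, 0 ≤ t ∧ t < (cs.length : Int))
    (h6 : ∀ y, y ∈ stA.2 ↔ ∃ t ∈ p.2, y = gRot cs t) :
    (J.foldl pvFA stA).1.length = cs.length ∧
    0 ≤ (J.foldl (fun p j => gPass (cs.length : Int) j p) p).1 ∧
    (J.foldl (fun p j => gPass (cs.length : Int) j p) p).1 < (cs.length : Int) ∧
    (J.foldl pvFA stA).1 =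
      cs.rotate (J.foldl (fun p j => gPass (cs.length : Int) j p) p).1.toNat ∧
    (∀ t ∈ (J.foldl (fun p j => gPass (cs.length : Int) j p) p).2,
      0 ≤ t ∧ t < (cs.length : Int)) ∧
    (∀ y, y ∈ (J.foldl pvFA stA).2 ↔
      ∃ t ∈ (J.foldl (fun p j => gPass (cs.length : Int) j p) p).2, y = gRot cs t) := by
  induction J generalizing stA p with
  | nil => exact ⟨h1, h2, h3, h4, h5, h6⟩
  | cons j J ih =>
    obtain ⟨hj0, hj1⟩ := hJ j List.mem_cons_self
    simp only [List.foldl_cons]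
    obtain ⟨g1, g2, g3, g4, g5, g6⟩ := pvInner cs hj0 (by omega)
      (PySem.List.pyRange 0 ((cs.length : Int) - 1) 1) stA.1 stA.2 p
      h1 h2 h3 h4 h5 h6
    have hFA : pvFA stA j = (PySem.List.pyRange 0 ((cs.length : Int) - 1) 1).foldl
        (fun (st : List Char × List String) _k =>
          let i := pvRotA st.1 j
          (i, st.2 ++ [String.ofList i])) stA := by
      unfold pvFA
      rw [h1]
    rw [hFA]
    exact ih (fun j' hj' => hJ j' (List.mem_cons_of_mem _ hj')) _ _ g1 g2 g3 g4 g5 g6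

-- coverage: for n ≥ 3 the ghost walk visits every offset of [0, n)
theorem gCover (n : Int) (hn : 3 ≤ n) (t : Int) (ht0 : 0 ≤ t) (ht1 : t < n) :
    t ∈ (gOut n).2 := by
  have hn0 : (0:Int) < n := by omega
  have hJ3 : PySem.List.pyRange (n-3) n 1 = [n-3, n-2, n-1] := by
    rw [PySem.List.pyRange_one_cons (by omega : n-3 < n), show n-3+1 = n-2 by ring,
      PySem.List.pyRange_one_cons (by omega : n-2 < n), show n-2+1 = n-1 by ring,
      PySem.List.pyRange_one_cons (by omega : n-1 < n), show n-1+1 = n by ring,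
      PySem.List.pyRange_one_eq_nil (le_refl n)]
  have hJ : PySem.List.pyRange (n-1) (-1) (-1)
      = [n-1, n-2, n-3] ++ (PySem.List.pyRange 0 (n-3) 1).reverse := by
    rw [PySem.List.pyRange_neg_one_eq_reverse, show (-1:Int)+1 = 0 by ring,
      show n-1+1 = n by ring,
      PySem.List.pyRange_one_append 0 (n-3) n (by omega) (by omega), hJ3]
    simp
  unfold gOut
  rw [hJ, List.foldl_append]
  simp only [List.foldl_cons, List.foldl_nil]
  set p1 := gPass n (n-1) (0, PySem.Set.empty) with hp1
  set p2 := gPass n (n-2) p1 with hp2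
  set p3 := gPass n (n-3) p2 with hp3
  apply gMono n hn0
  have hmN : ((n-1).toNat - 1 : Nat) + 1 = (n-1).toNat := by omega
  have hcast : (((n-1).toNat - 1 : Nat) : Int) + 1 = n - 1 := by omega
  have hfst1 : p1.1 = 1 := by
    rw [hp1, gPass_eq, ← hmN, gIter_fst n (n-1) hn0, hcast,
      show (0:Int) + (n-1)*(n-1) = 1 + n*(n-2) by ring, Int.add_mul_emod_self_left]
    exact Int.emod_eq_of_lt (by omega) (by omega)
  have hsub12 : ∀ u, u ∈ p1.2 → u ∈ p2.2 := by
    intro u hu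
    rw [hp2, gPass_eq]
    exact (gIter_mem n (n-2) hn0 _ p1.1 p1.2 u).2 (Or.inl hu)
  have hsub23 : ∀ u, u ∈ p2.2 → u ∈ p3.2 := by
    intro u hu
    rw [hp3, gPass_eq]
    exact (gIter_mem n (n-3) hn0 _ p2.1 p2.2 u).2 (Or.inl hu)
  by_cases ht : 1 ≤ t
  · apply hsub23 _ (hsub12 _ ?_)
    rw [hp1, gPass_eq]
    apply (gIter_mem n (n-1) hn0 _ _ _ t).2
    refine Or.inr ⟨(n - t).toNat, by omega, by omega, ?_⟩
    rw [show (((n - t).toNat : Nat) : Int) = n - t by omega,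
      show (0:Int) + (n-1)*(n-t) = t + n*(n-t-1) by ring, Int.add_mul_emod_self_left]
    exact (Int.emod_eq_of_lt ht0 ht1).symm
  · have ht0' : t = 0 := by omega
    subst ht0'
    rcases Int.even_or_odd n with ⟨m', hm'⟩ | ⟨m', hm'⟩
    · have hfst2 : p2.1 = 3 := by
        rw [hp2, gPass_eq, ← hmN, gIter_fst n (n-2) hn0, hcast, hfst1,
          show (1:Int) + (n-2)*(n-1) = 3 + n*(n-3) by ring, Int.add_mul_emod_self_left]
        exact Int.emod_eq_of_lt (by omega) (by omega)
      rw [hp3, gPass_eq]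
      refine (gIter_mem n (n-3) hn0 ((n-1).toNat) p2.1 p2.2 0).2
        (Or.inr ⟨1, le_refl 1, by omega, ?_⟩)
      rw [hfst2, show (3:Int) + (n-3)*((1:Nat):Int) = n by push_cast; ring]
      simp
    · apply hsub23
      rw [hp2, gPass_eq]
      refine (gIter_mem n (n-2) hn0 ((n-1).toNat) p1.1 p1.2 0).2
        (Or.inr ⟨(m'+1).toNat, by omega, by omega, ?_⟩)
      rw [hfst1, show (((m'+1).toNat : Nat) : Int) = m' + 1 by omega,
        show (1:Int) + (n-2)*(m'+1) = n * m' by rw [hm']; ring]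
      exact (Int.mul_emod_right n m').symm

theorem pvElem_eq3 (s : String) (h : 3 ≤ s.toList.length) : pvElemA s = pvCanon s := by
  unfold pvElemA pvCanon
  have hn : 0 < s.toList.length := by omega
  have hJ : ∀ j ∈ PySem.List.pyRange ((s.toList.length : Int) - 1) (-1) (-1),
      0 ≤ j ∧ j ≤ (s.toList.length : Int) - 1 := by
    intro j hj
    have := PySem.List.mem_pyRange_neg_one.1 hj
    omega
  obtain ⟨f1, f2, f3, f4, f5, f6⟩ := pvOuter s.toList hn
    (PySem.List.pyRange ((s.toList.length : Int) - 1) (-1) (-1)) hJ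
    (s.toList, []) (0, PySem.Set.empty) rfl (le_refl 0)
    (by show (0:Int) < (s.toList.length : Int); exact_mod_cast hn)
    (by simp) (by intro t ht; exact absurd ht (by simp [PySem.Set.empty]))
    (by intro y; simp [PySem.Set.empty])
  have hmapB : (PySem.List.pyRange 0 (s.toList.length : Int) 1).map
      (fun i => String.ofList (PySem.List.slice s.toList (some i) none ++
                               PySem.List.slice s.toList none (some i)))
      = (PySem.List.pyRange 0 (s.toList.length : Int) 1).map (fun i => gRot s.toList i) := by
    apply List.map_congr_left
    intro i hi
    have hb := PySem.List.mem_pyRange_one.1 hi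
    show String.ofList (pvRotA s.toList i) = _
    rw [pvRotA_eq_rot s.toList hb.1 (le_of_lt hb.2)]
    rfl
  rw [hmapB]
  apply pvMin_eq
  intro y
  rw [f6 y]
  constructor
  · rintro ⟨t, ht, rfl⟩
    obtain ⟨hb0, hb1⟩ := f5 t ht
    exact List.mem_map.2 ⟨t, PySem.List.mem_pyRange_one.2 ⟨hb0, hb1⟩, rfl⟩
  · intro hy
    obtain ⟨i, hi, rfl⟩ := List.mem_map.1 hy
    have hb := PySem.List.mem_pyRange_one.1 hi
    refine ⟨i, ?_, rfl⟩
    have hcov := gCover (s.toList.length : Int) (by exact_mod_cast h) i hb.1 hb.2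
    exact hcov

theorem pvElemA_two (s : String) (a b : Char) (hs : s.toList = [a, b]) :
    pvElemA s = String.ofList [b, a] := by
  unfold pvElemA
  rw [hs]
  have e1 : ((([a, b] : List Char).length : Int) - 1) = 1 := by simp
  rw [e1, show PySem.List.pyRange 1 (-1) (-1) = [1, 0] from by decide]
  have r1 : pvRotA [a, b] 1 = [b, a] := by
    unfold pvRotA
    rw [PySem.List.slice_from _ (by norm_num), PySem.List.slice_to _ (by norm_num)]
    rfl
  have r0 : pvRotA [b, a] 0 = [b, a] := by
    unfold pvRotA
    rw [PySem.List.slice_from _ (by norm_num), PySem.List.slice_to _ (by norm_num)]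
    rfl
  have hFA1 : pvFA ([a, b], ([] : List String)) 1 = ([b, a], [String.ofList [b, a]]) := by
    unfold pvFA
    rw [show ((([a, b] : List Char).length : Int) - 1) = 1 by simp,
      show PySem.List.pyRange 0 1 1 = [0] from by decide]
    simp [r1]
  have hFA0 : pvFA ([b, a], [String.ofList [b, a]]) 0
      = ([b, a], [String.ofList [b, a], String.ofList [b, a]]) := by
    unfold pvFA
    rw [show ((([b, a] : List Char).length : Int) - 1) = 1 by simp,
      show PySem.List.pyRange 0 1 1 = [0] from by decide]
    simp [r0]
  simp only [List.foldl_cons, List.foldl_nil, hFA1, hFA0]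
  rw [pvMin_eq [String.ofList [b, a], String.ofList [b, a]]
    [String.ofList [b, a], String.ofList [b, a]] (fun y => Iff.rfl),
    PySem.List.min?_id_cons]
  simp

theorem pvCanon_two (s : String) (a b : Char) (hs : s.toList = [a, b]) :
    pvCanon s = min (String.ofList [a, b]) (String.ofList [b, a]) := by
  unfold pvCanon
  rw [hs]
  rw [show ((([a, b] : List Char).length : Int)) = 2 by simp,
    show PySem.List.pyRange 0 2 1 = [0, 1] from by decide]
  have r0 : PySem.List.slice ([a, b] : List Char) (some 0) none ++
      PySem.List.slice ([a, b] : List Char) none (some 0) = [a, b] := by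
    rw [PySem.List.slice_from _ (by norm_num), PySem.List.slice_to _ (by norm_num)]
    rfl
  have r1 : PySem.List.slice ([a, b] : List Char) (some 1) none ++
      PySem.List.slice ([a, b] : List Char) none (some 1) = [b, a] := by
    rw [PySem.List.slice_from _ (by norm_num), PySem.List.slice_to _ (by norm_num)]
    rfl
  simp only [List.map_cons, List.map_nil, r0, r1]
  rw [PySem.List.min?_id_cons]
  simp

theorem ofList_le_ofList_iff (a b : Char) :
    String.ofList [a, b] ≤ String.ofList [b, a] ↔ a < b ∨ a = b := by
  rw [String.le_iff_toList_le, String.toList_ofList, String.toList_ofList]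
  constructor
  · intro h
    rcases lt_trichotomy a b with hab | hab | hab
    · exact Or.inl hab
    · exact Or.inr hab
    · exact absurd h (not_le.2 (List.Lex.rel hab))
  · rintro (hab | rfl)
    · exact le_of_lt (List.Lex.rel hab)
    · exact le_refl _

theorem pvElem_eq2 (s : String) (a b : Char) (hs : s.toList = [a, b]) (hba : b ≤ a) :
    pvElemA s = pvCanon s := by
  rw [pvElemA_two s a b hs, pvCanon_two s a b hs, min_def]
  by_cases hab : String.ofList [a, b] ≤ String.ofList [b, a]
  · rcases (ofList_le_ofList_iff a b).1 hab with h | rfl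
    · exact absurd h (not_lt.2 hba)
    · rw [if_pos hab]
  · simp [hab]

theorem pvFoldl_append {α : Type} (f : α → String) (l : List α) (acc : List String) :
    l.foldl (fun r x => r ++ [f x]) acc = acc ++ l.map f := by
  induction l generalizing acc with
  | nil => simp
  | cons x t ih => simp [ih]

theorem pvWitnessA : make_repr ["ab"] = ["ba"] := by
  unfold make_repr
  simp only [List.foldl_cons, List.foldl_nil, List.nil_append]
  rw [pvElemA_two "ab" 'a' 'b' (by decide),
    show String.ofList ['b', 'a'] = "ba" from by decide]
  decide

theorem pvWitnessB : make_repr_alt ["ab"] = ["ab"] := by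
  unfold make_repr_alt
  simp only [List.map_cons, List.map_nil]
  rw [pvCanon_two "ab" 'a' 'b' (by decide), min_def,
    if_pos ((ofList_le_ofList_iff 'a' 'b').2 (Or.inl (by decide))),
    show String.ofList ['a', 'b'] = "ab" from by decide]
  decide

-- every canonical form B produces has the length of its input string
theorem pvCanon_len (s : String) (h : 1 ≤ s.toList.length) :
    (pvCanon s).toList.length = s.toList.length := by
  unfold pvCanon
  cases hmin : PySem.List.min?
      ((PySem.List.pyRange 0 (s.toList.length : Int) 1).map
        (fun i => String.ofList (PySem.List.slice s.toList (some i) none ++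
                                 PySem.List.slice s.toList none (some i))))
      (fun x => x) with
  | none =>
    have hmap := (PySem.List.min?_eq_none_iff _ _).1 hmin
    rw [PySem.List.pyRange_one_cons (by exact_mod_cast h : (0:Int) < (s.toList.length : Int))]
      at hmap
    simp at hmap
  | some m =>
    simp only [Option.getD_some]
    obtain ⟨i, hi, rfl⟩ := List.mem_map.1 (PySem.List.min?_mem hmin)
    obtain ⟨hi0, hi1⟩ := PySem.List.mem_pyRange_one.1 hi
    rw [String.toList_ofList, PySem.List.slice_from _ hi0, PySem.List.slice_to _ hi0]
    simp only [List.length_append, List.length_drop, List.length_take]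
    omega

theorem ofList_inj (l l' : List Char) (h : String.ofList l = String.ofList l') : l = l' := by
  have := congrArg String.toList h
  rwa [String.toList_ofList, String.toList_ofList] at this

theorem pred_shape (s : String)
    (hp : (match s.toList with | [a, b] => decide (a < b) | _ => false) = true) :
    ∃ a b, s.toList = [a, b] ∧ a < b := by
  rcases hts : s.toList with - | ⟨a, rest⟩ <;> rw [hts] at hp
  · simp at hp
  · rcases rest with - | ⟨b, rest2⟩
    · simp at hp
    · rcases rest2 with - | ⟨c, r3⟩
      · exact ⟨a, b, rfl, of_decide_eq_true hp⟩
      · simp at hp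

-- ===== VERDICT (by name: the statements are the Claim_ definitions above) =====
theorem make_repr_spec : Claim_unchanged_make_repr := by
  intro seq_l _hdom hpre hnd
  show make_repr seq_l = make_repr_alt seq_l
  unfold make_repr make_repr_alt
  rw [pvFoldl_append pvElemA seq_l []]
  simp only [List.nil_append]
  congr 1
  apply List.map_congr_left
  intro s hs
  have h2 : 2 ≤ s.toList.length := hpre s hs
  by_cases h3 : 3 ≤ s.toList.length
  · exact pvElem_eq3 s h3
  · have hl2 : s.toList.length = 2 := by omega
    obtain ⟨a, b, hab⟩ := List.length_eq_two.1 hl2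
    have hpred : ¬ ((match s.toList with
        | [a, b] => decide (a < b)
        | _ => false) = true) := by
      intro hp
      exact hnd (List.any_eq_true.2 ⟨s, hs, hp⟩)
    rw [hab] at hpred
    simp only [decide_eq_true_eq] at hpred
    exact pvElem_eq2 s a b hab (not_lt.1 hpred)

theorem make_repr_changed : Claim_changed_make_repr := by
  unfold Claim_changed_make_repr
  exact ⟨by decide, by decide, by decide, pvWitnessA, pvWitnessB, by decide⟩

theorem make_repr_tight : Claim_exact_make_repr := by
  intro seq_l _hdom hpre hd heq
  obtain ⟨s, hs, hp⟩ := List.any_eq_true.1 hd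
  obtain ⟨a, b, hts, hab⟩ := pred_shape s hp
  have hmemA : String.ofList [b, a] ∈ make_repr seq_l := by
    unfold make_repr
    rw [pvFoldl_append pvElemA seq_l [], List.nil_append]
    exact (PySem.Set.mem_ofList _ _).2 (List.mem_map.2 ⟨s, hs, (pvElemA_two s a b hts).symm ▸ rfl⟩)
  have hmemB : String.ofList [b, a] ∉ make_repr_alt seq_l := by
    intro hmem
    unfold make_repr_alt at hmem
    obtain ⟨u, hu, hueq⟩ := List.mem_map.1 ((PySem.Set.mem_ofList _ _).1 hmem)
    have h2u : 2 ≤ u.toList.length := hpre u hu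
    by_cases h3 : 3 ≤ u.toList.length
    · have hlen := pvCanon_len u (by omega)
      rw [hueq, String.toList_ofList] at hlen
      have h2 : (2:Nat) = u.toList.length := by simpa using hlen
      omega
    · obtain ⟨c, d, hcd⟩ := List.length_eq_two.1 (by omega : u.toList.length = 2)
      rw [pvCanon_two u c d hcd, min_def] at hueq
      by_cases hle : String.ofList [c, d] ≤ String.ofList [d, c]
      · rw [if_pos hle] at hueq
        obtain ⟨hc, hd⟩ : c = b ∧ d = a := by
          have := ofList_inj _ _ hueq
          simp at this
          exact this
        rcases (ofList_le_ofList_iff c d).1 hle with h | h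
        · rw [hc, hd] at h
          exact absurd hab (lt_asymm h)
        · rw [hc, hd] at h
          exact absurd hab (by rw [h]; exact lt_irrefl a)
      · rw [if_neg hle] at hueq
        obtain ⟨hd, hc⟩ : d = b ∧ c = a := by
          have := ofList_inj _ _ hueq
          simp at this
          exact this
        exact hle ((ofList_le_ofList_iff c d).2 (Or.inl (by rw [hc, hd]; exact hab)))
  rw [heq] at hmemA
  exact hmemB hmemA
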